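-- pv_equiv track=rewrite | github.com/RemcoSchrijver/advent-of-code | 2024/src/day15.py | create_larger_grid
-- ===== SOURCE A (Python) =====
-- def create_larger_grid(
--     input_strings: list[str],
-- ) -> tuple[list[list[str]], tuple[int, int]]:
--     grid = []
--     start_pos = (0, 0)
--     for y, input_string in enumerate(input_strings):
--         row = []
--         for x, char in enumerate(input_string.strip()):
--             match char:
--                 case "@":
--                     start_pos = (y, x * 2)
--                     row.append(char)
--                     row.append(".")
--                 case "O":
--                     row.append("[")
--                     row.append("]")
--                 case _:
--                     row.append(char)
--                     row.append(char)
--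
--         grid.append(row)
--     return grid, start_pos
-- ===== SOURCE B (Python) =====
-- def create_larger_grid(
--     input_strings: list[str],
-- ) -> tuple[list[list[str]], tuple[int, int]]:
--     stripped = [s.strip() for s in input_strings]
--     # grid: interleave two character-wise translated copies of each line
--     left = str.maketrans({"O": "["})
--     right = str.maketrans({"@": ".", "O": "]"})
--     grid = [[c for pair in zip(line.translate(left), line.translate(right)) for c in pair]
--             for line in stripped]
--     # start: scan from the bottom, take the rightmost '@' of the last line containing one
--     start_pos = (0, 0)
--     for y in range(len(stripped) - 1, -1, -1):
--         x = stripped[y].rfind("@")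
--         if x != -1:
--             start_pos = (y, x * 2)
--             break
--     return grid, start_pos
-- ===== Notes on version B (the rewrite author's own statement) =====
-- stated objective: alternative
-- what changed: Instead of A's single fused loop that expands each cell to a pair while overwriting start_pos, B builds each doubled row by interleaving (zip) two whole-line character translations, and finds the start separately by scanning lines bottom-up with rfind('@') and stopping at the first hit.
import Mathlib
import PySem

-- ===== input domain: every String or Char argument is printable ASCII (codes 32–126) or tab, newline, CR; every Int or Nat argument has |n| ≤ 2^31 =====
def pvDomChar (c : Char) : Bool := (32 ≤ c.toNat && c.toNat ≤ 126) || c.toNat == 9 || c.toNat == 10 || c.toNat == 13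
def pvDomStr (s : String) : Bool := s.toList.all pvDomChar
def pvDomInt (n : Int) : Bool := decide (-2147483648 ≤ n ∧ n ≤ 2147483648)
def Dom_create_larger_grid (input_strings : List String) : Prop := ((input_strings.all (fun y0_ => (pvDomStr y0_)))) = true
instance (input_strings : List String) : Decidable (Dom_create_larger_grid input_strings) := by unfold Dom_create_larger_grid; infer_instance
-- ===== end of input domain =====

-- B builds each doubled row by zip-interleaving two whole-line character translations and
-- finds the start by a bottom-up rfind('@') scan that stops at the first hit (objective: alternative decomposition).


-- ===== PORT A =====
-- one fused loop: builds each row cell by cell and overwrites start_pos at every '@'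
def create_larger_grid (input_strings : List String) : List (List String) × (Int × Int) :=
  (PySem.List.enumerate input_strings).foldl
    (fun (acc : List (List String) × (Int × Int)) p =>
      let y := p.1
      let inner := (PySem.List.enumerate (PySem.Str.strip p.2).toList).foldl
        (fun (acc2 : List String × (Int × Int)) q =>
          if q.2 = '@' then (acc2.1 ++ [String.mk [q.2], "."], (y, q.1 * 2))
          else if q.2 = 'O' then (acc2.1 ++ ["[", "]"], acc2.2)
          else (acc2.1 ++ [String.mk [q.2], String.mk [q.2]], acc2.2))
        (([] : List String), acc.2)
      (acc.1 ++ [inner.1], inner.2))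
    (([] : List (List String)), ((0 : Int), (0 : Int)))

-- ===== PORT B =====
-- line.translate(left): 'O' → '[', everything else unchanged
def leftChar (c : Char) : Char := if c = 'O' then '[' else c
-- line.translate(right): '@' → '.', 'O' → ']', everything else unchanged
def rightChar (c : Char) : Char := if c = '@' then '.' else if c = 'O' then ']' else c

-- s.rfind('@') specialised to the single-character needle over the full string:
-- index of the last occurrence, -1 if absent (exact for this call)
def rfindAt : List Char → Int
  | [] => -1
  | c :: t =>
    let r := rfindAt t
    if r ≠ -1 then r + 1 else if c = '@' then 0 else -1

-- the bottom-up 'for y in range(len-1,-1,-1)' loop with break: recursion over the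
-- reversed enumerated lines, stopping at the first line whose rfind is not -1
def findStart : List (Int × List Char) → Int × Int
  | [] => (0, 0)
  | (y, line) :: rest =>
    let x := rfindAt line
    if x ≠ -1 then (y, x * 2) else findStart rest

def create_larger_grid_alt (input_strings : List String) : List (List String) × (Int × Int) :=
  let stripped := input_strings.map (fun s => (PySem.Str.strip s).toList)
  let grid := stripped.map (fun line =>
    ((line.map leftChar).zip (line.map rightChar)).flatMap
      (fun p => [String.mk [p.1], String.mk [p.2]]))
  let start := findStart (PySem.List.enumerate stripped).reverse
  (grid, start)

-- ===== PRECONDITION & SPEC =====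
def Spec_create_larger_grid (input_strings : List String) (out : List (List String) × (Int × Int)) : Prop := out = create_larger_grid_alt input_strings
instance (input_strings : List String) (out : List (List String) × (Int × Int)) : Decidable (Spec_create_larger_grid input_strings out) := by unfold Spec_create_larger_grid; infer_instance

-- ===== CLAIM (what is proved, stated in full; the proofs are below) =====
def Claim_equal_create_larger_grid : Prop := ∀ (input_strings : List String), Dom_create_larger_grid input_strings → Spec_create_larger_grid input_strings (create_larger_grid input_strings)

-- ===== LEMMAS AND PROOFS =====

-- A's per-cell expansion, as a list
def expandCell (c : Char) : List String :=
  if c = '@' then ["@", "."]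
  else if c = 'O' then ["[", "]"]
  else [String.mk [c], String.mk [c]]

-- '@'-positions of one line, in order (what A's overwrites walk through)
def posList (y : Int) (cs : List Char) (s : Int) : List (Int × Int) :=
  (PySem.List.enumerate cs s).filterMap
    (fun q => if q.2 = '@' then some (y, q.1 * 2) else none)

theorem getLastD_cons {α : Type} (a : α) (l : List α) (d : α) :
    (a :: l).getLast?.getD d = l.getLast?.getD a := by
  induction l generalizing a d with
  | nil => simp
  | cons b t ih => rw [List.getLast?_cons_cons, ih, ih]

theorem getLastD_append {α : Type} (l1 l2 : List α) (d : α) :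
    (l1 ++ l2).getLast?.getD d = l2.getLast?.getD (l1.getLast?.getD d) := by
  induction l1 generalizing d with
  | nil => simp
  | cons a t ih => simp only [List.cons_append, getLastD_cons, ih]

-- A's inner loop = (row extended by the flat expansion, start overwritten by the last '@')
theorem inner_loop (y : Int) (cs : List Char) (s : Int) (row : List String) (pos : Int × Int) :
    (PySem.List.enumerate cs s).foldl
      (fun (acc2 : List String × (Int × Int)) q =>
        if q.2 = '@' then (acc2.1 ++ [String.mk [q.2], "."], (y, q.1 * 2))
        else if q.2 = 'O' then (acc2.1 ++ ["[", "]"], acc2.2)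
        else (acc2.1 ++ [String.mk [q.2], String.mk [q.2]], acc2.2))
      (row, pos)
    = (row ++ cs.flatMap expandCell, (posList y cs s).getLast?.getD pos) := by
  induction cs generalizing s row pos with
  | nil => simp [posList, PySem.List.enumerate_nil]
  | cons c t ih =>
    simp only [PySem.List.enumerate_cons, List.foldl_cons, posList, List.filterMap_cons]
    by_cases h : c = '@'
    · subst h
      simp [ih, posList, getLastD_cons, expandCell, List.append_assoc]
      decide
    · by_cases h2 : c = 'O'
      · subst h2
        simp [ih, posList, expandCell, List.append_assoc]
      · simp [h, h2, ih, posList, expandCell, List.append_assoc]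

-- A's outer loop, generalized over the enumeration start and the accumulator
theorem outer_loop (L : List String) (y0 : Int) (g0 : List (List String)) (pos : Int × Int) :
    (PySem.List.enumerate L y0).foldl
      (fun (acc : List (List String) × (Int × Int)) p =>
        let y := p.1
        let inner := (PySem.List.enumerate (PySem.Str.strip p.2).toList).foldl
          (fun (acc2 : List String × (Int × Int)) q =>
            if q.2 = '@' then (acc2.1 ++ [String.mk [q.2], "."], (y, q.1 * 2))
            else if q.2 = 'O' then (acc2.1 ++ ["[", "]"], acc2.2)
            else (acc2.1 ++ [String.mk [q.2], String.mk [q.2]], acc2.2))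
          (([] : List String), acc.2)
        (acc.1 ++ [inner.1], inner.2))
      (g0, pos)
    = (g0 ++ L.map (fun str => (PySem.Str.strip str).toList.flatMap expandCell),
       ((PySem.List.enumerate L y0).flatMap
          (fun p => posList p.1 (PySem.Str.strip p.2).toList 0)).getLast?.getD pos) := by
  induction L generalizing y0 g0 pos with
  | nil => simp [PySem.List.enumerate_nil]
  | cons str t ih =>
    simp only [PySem.List.enumerate_cons, List.foldl_cons, List.flatMap_cons, List.map_cons]
    rw [inner_loop]
    simp only [List.nil_append, ih, getLastD_append, List.append_assoc, List.cons_append,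
      List.nil_append]

theorem enumerate_map {α β : Type} (f : α → β) (L : List α) (s : Int) :
    PySem.List.enumerate (L.map f) s
      = (PySem.List.enumerate L s).map (fun p => (p.1, f p.2)) := by
  induction L generalizing s with
  | nil => simp [PySem.List.enumerate_nil]
  | cons a t ih => simp [PySem.List.enumerate_cons, ih]

-- the zip of the two translations interleaves to A's flat expansion
theorem zip_translate_eq_expand (cs : List Char) :
    ((cs.map leftChar).zip (cs.map rightChar)).flatMap
      (fun p => [String.mk [p.1], String.mk [p.2]])
    = cs.flatMap expandCell := by
  induction cs with
  | nil => rfl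
  | cons c t ih =>
    simp only [List.map_cons, List.zip_cons_cons, List.flatMap_cons, ih]
    by_cases h : c = '@'
    · subst h; rfl
    · by_cases h2 : c = 'O'
      · subst h2; rfl
      · simp [leftChar, rightChar, expandCell, h, h2]

-- rfindAt really is the last '@'-position of the line
theorem rfindAt_cases (cs : List Char) : rfindAt cs = -1 ∨ 0 ≤ rfindAt cs := by
  induction cs with
  | nil => left; rfl
  | cons c t ih =>
    by_cases ht : rfindAt t = -1
    · by_cases h : c = '@'
      · right; simp [rfindAt, ht, h]
      · left; simp [rfindAt, ht, h]
    · right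
      simp only [rfindAt, ne_eq, ht, not_false_iff, if_true]
      rcases ih with h1 | h1
      · exact absurd h1 ht
      · omega

theorem posList_getLast (y : Int) (cs : List Char) (s : Int) :
    (posList y cs s).getLast?
      = if rfindAt cs = -1 then none else some (y, (rfindAt cs + s) * 2) := by
  induction cs generalizing s with
  | nil => simp [posList, PySem.List.enumerate_nil, rfindAt]
  | cons c t ih =>
    have hstep : posList y (c :: t) s
        = (if c = '@' then [(y, s * 2)] else []) ++ posList y t (s + 1) := by
      by_cases h : c = '@' <;> simp [posList, PySem.List.enumerate_cons, h]
    rw [hstep]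
    by_cases ht : rfindAt t = -1
    · have hempty : posList y t (s + 1) = [] := by
        have h1 := ih (s + 1)
        rw [if_pos ht] at h1
        simpa using h1
      by_cases h : c = '@'
      · simp [h, hempty, rfindAt, ht]
      · simp [h, hempty, rfindAt, ht]
    · have hlast := ih (s + 1)
      rw [if_neg ht] at hlast
      have hr : rfindAt (c :: t) = rfindAt t + 1 := by
        simp [rfindAt, ht]
      have hne : rfindAt (c :: t) ≠ -1 := by
        rcases rfindAt_cases t with h1 | h1
        · exact absurd h1 ht
        · rw [hr]; omega
      rw [List.getLast?_append, hlast, if_neg hne, hr]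
      simp; ring_nf

-- A's "last '@' overall" equals B's bottom-up stop-at-first-hit scan
theorem last_eq_findStart (L : List (Int × List Char)) :
    ((L.reverse).flatMap (fun p => posList p.1 p.2 0)).getLast?.getD (0, 0)
      = findStart L := by
  induction L with
  | nil => rfl
  | cons p rest ih =>
    obtain ⟨y, line⟩ := p
    simp only [List.reverse_cons, List.flatMap_append, List.flatMap_cons, List.flatMap_nil,
      List.append_nil, getLastD_append, findStart]
    by_cases h : rfindAt line = -1
    · have : (posList y line 0).getLast? = none := by rw [posList_getLast, if_pos h]
      rw [this]; simp [h, ih]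
    · have : (posList y line 0).getLast? = some (y, rfindAt line * 2) := by
        rw [posList_getLast, if_neg h]; ring_nf
      rw [this]; simp [h]

-- ===== VERDICT (by name: the statement is the Claim_ definition above) =====
theorem create_larger_grid_spec : Claim_equal_create_larger_grid := by
  intro input_strings _
  show _ = _
  unfold create_larger_grid create_larger_grid_alt
  rw [outer_loop]
  have hstart := last_eq_findStart
    ((PySem.List.enumerate input_strings).map
      (fun p => (p.1, (PySem.Str.strip p.2).toList))).reverse
  rw [List.reverse_reverse] at hstart
  simp only [List.flatMap_map] at hstart
  simp only [List.nil_append, enumerate_map, hstart]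
  simp [List.map_map, Function.comp, zip_translate_eq_expand]
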